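-- pv_equiv track=rewrite | github.com/Deepthi-Vemula/scaler-python | 6-sorting/assignment.py | ifNobleIntegerExistsInArray
-- ===== SOURCE A (Python) =====
-- def ifNobleIntegerExistsInArray(A):
--     A.sort()
--     n = len(A)
--     for i in range(n):
--         if i != n-1 and A[i] == A[i+1]:
--             continue
--         if n-i-1 == A[i]:
--             return 1
--     return -1
-- ===== SOURCE B (Python) =====
-- def ifNobleIntegerExistsInArray(A):
--     n = len(A)
--     cnt = [0] * n
--     big = 0  # elements with value >= n (more than any candidate)
--     for x in A:
--         if 0 <= x < n:
--             cnt[x] += 1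
--         elif x >= n:
--             big += 1
--     greater = big  # count of elements strictly greater than current v
--     for v in range(n - 1, -1, -1):
--         if cnt[v] and greater == v:
--             return 1
--         greater += cnt[v]
--     return -1
-- ===== Notes on version B (the rewrite author's own statement) =====
-- stated objective: faster
-- what changed: B drops the sort entirely: any noble value must lie in [0, n-1], so B buckets the values into cnt[0..n-1] in one pass (counting values >= n separately) and then scans v from n-1 down to 0 maintaining a running suffix count of strictly greater elements, instead of A's sort followed by a duplicate-skipping scan of the sorted array.
import Mathlib
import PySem

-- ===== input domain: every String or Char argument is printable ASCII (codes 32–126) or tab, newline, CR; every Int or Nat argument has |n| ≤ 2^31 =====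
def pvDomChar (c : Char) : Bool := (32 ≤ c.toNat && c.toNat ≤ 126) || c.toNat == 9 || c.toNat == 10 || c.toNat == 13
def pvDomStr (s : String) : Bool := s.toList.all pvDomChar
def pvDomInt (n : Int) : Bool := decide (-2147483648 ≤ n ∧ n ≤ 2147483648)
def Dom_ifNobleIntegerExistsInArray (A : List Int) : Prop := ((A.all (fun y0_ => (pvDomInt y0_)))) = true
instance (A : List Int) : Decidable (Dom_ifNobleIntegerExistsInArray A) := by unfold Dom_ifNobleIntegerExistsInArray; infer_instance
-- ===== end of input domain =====

-- B replaces A's sort-then-scan with value buckets in [0,n-1] plus a descending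
-- suffix count of greater elements (objective: faster). Python A sorts its argument
-- in place; the equivalence proved here is about the RETURN value only (B does not mutate A).

-- ===== PORT A =====
-- the for-i-in-range(n) loop with `continue` and early `return 1`; indices accessed are in range
def pvLoopA (S : List Int) (n i : Nat) : Int :=
  if _h : i < n then
    if i ≠ n - 1 ∧ S.getD i 0 = S.getD (i + 1) 0 then pvLoopA S n (i + 1)
    else if (n : Int) - i - 1 = S.getD i 0 then 1
    else pvLoopA S n (i + 1)
  else -1
termination_by n - i

def ifNobleIntegerExistsInArray (A : List Int) : Int :=
  let S := PySem.List.sorted A (fun x => x) false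
  pvLoopA S S.length 0

-- ===== PORT B =====
-- first loop of Source B: bucket the values of A into cnt[0..n-1], count values ≥ n in big
def pvFillB (n : Nat) (st : List Int × Int) (x : Int) : List Int × Int :=
  if 0 ≤ x ∧ x < (n : Int) then (st.1.set x.toNat (st.1.getD x.toNat 0 + 1), st.2)
  else if (n : Int) ≤ x then (st.1, st.2 + 1)
  else st

-- second loop of Source B: for v in range(n-1,-1,-1), argument k is v+1 (k = 0 means done)
def pvLoopB (cnt : List Int) : Nat → Int → Int
  | 0, _ => -1
  | v + 1, greater =>
    if cnt.getD v 0 ≠ 0 ∧ greater = (v : Int) then 1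
    else pvLoopB cnt v (greater + cnt.getD v 0)

def ifNobleIntegerExistsInArray_alt (A : List Int) : Int :=
  let n := A.length
  let st := A.foldl (pvFillB n) (List.replicate n 0, 0)
  pvLoopB st.1 n st.2

-- ===== PRECONDITION & SPEC =====
def Spec_ifNobleIntegerExistsInArray (A : List Int) (out : Int) : Prop := out = ifNobleIntegerExistsInArray_alt A
instance (A : List Int) (out : Int) : Decidable (Spec_ifNobleIntegerExistsInArray A out) := by unfold Spec_ifNobleIntegerExistsInArray; infer_instance

-- ===== CLAIM (what is proved, stated in full; the proofs are below) =====
def Claim_equal_ifNobleIntegerExistsInArray : Prop := ∀ (A : List Int), Dom_ifNobleIntegerExistsInArray A → Spec_ifNobleIntegerExistsInArray A (ifNobleIntegerExistsInArray A)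

-- ===== LEMMAS AND PROOFS =====

-- "v is a noble element of A": v occurs in A and the number of strictly greater elements is v
def pvNoble (A : List Int) (v : Int) : Prop :=
  v ∈ A ∧ (A.countP (fun x => decide (v < x)) : Int) = v

-- the condition under which A's loop body returns 1 at index j
def pvHitA (S : List Int) (n j : Nat) : Prop :=
  ¬(j ≠ n - 1 ∧ S.getD j 0 = S.getD (j + 1) 0) ∧ (n : Int) - j - 1 = S.getD j 0

lemma pvLoopA_one_or_neg (S : List Int) (n : Nat) : ∀ i, pvLoopA S n i = 1 ∨ pvLoopA S n i = -1 := by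
  have H : ∀ m i, n - i ≤ m → (pvLoopA S n i = 1 ∨ pvLoopA S n i = -1) := by
    intro m
    induction m with
    | zero =>
      intro i h; rw [pvLoopA]
      have hni : ¬ i < n := by omega
      simp [hni]
    | succ m ih =>
      intro i h
      rw [pvLoopA]
      by_cases hi : i < n
      · simp only [hi, dif_pos]
        split_ifs with h1 h2
        · exact ih (i+1) (by omega)
        · left; rfl
        · exact ih (i+1) (by omega)
      · simp [hi]
  exact fun i => H (n - i) i le_rfl

lemma pvLoopA_eq_one_iff (S : List Int) (n : Nat) :
    ∀ i, pvLoopA S n i = 1 ↔ ∃ j, i ≤ j ∧ j < n ∧ pvHitA S n j := by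
  have H : ∀ m i, n - i ≤ m → (pvLoopA S n i = 1 ↔ ∃ j, i ≤ j ∧ j < n ∧ pvHitA S n j) := by
    intro m
    induction m with
    | zero =>
      intro i h; rw [pvLoopA]
      have hni : ¬ i < n := by omega
      simp only [hni]
      constructor
      · intro h1; cases h1
      · rintro ⟨j, hij, hjn, -⟩; omega
    | succ m ih =>
      intro i h
      rw [pvLoopA]
      by_cases hi : i < n
      · simp only [hi, dif_pos]
        split_ifs with h1 h2
        · rw [ih (i+1) (by omega)]
          constructor
          · rintro ⟨j, hij, hjn, hh⟩; exact ⟨j, by omega, hjn, hh⟩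
          · rintro ⟨j, hij, hjn, hh⟩
            refine ⟨j, ?_, hjn, hh⟩
            rcases Nat.eq_or_lt_of_le hij with rfl | hlt
            · exact absurd h1 hh.1
            · omega
        · constructor
          · intro _; exact ⟨i, le_rfl, hi, h1, h2⟩
          · intro _; rfl
        · rw [ih (i+1) (by omega)]
          constructor
          · rintro ⟨j, hij, hjn, hh⟩; exact ⟨j, by omega, hjn, hh⟩
          · rintro ⟨j, hij, hjn, hh⟩
            refine ⟨j, ?_, hjn, hh⟩
            rcases Nat.eq_or_lt_of_le hij with rfl | hlt
            · exact absurd hh.2 h2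
            · omega
      · simp only [hi]
        constructor
        · intro h1; cases h1
        · rintro ⟨j, hij, hjn, -⟩; omega
  exact fun i => H (n - i) i le_rfl

lemma pvCount_of_split (S : List Int) (v : Int) (m : Nat) (_hm : m ≤ S.length)
    (h1 : ∀ x ∈ S.take m, ¬ v < x) (h2 : ∀ x ∈ S.drop m, v < x) :
    S.countP (fun x => decide (v < x)) = S.length - m := by
  conv_lhs => rw [← List.take_append_drop m S]
  rw [List.countP_append]
  have e1 : (S.take m).countP (fun x => decide (v < x)) = 0 :=
    List.countP_eq_zero.2 (by intro a ha; simpa using h1 a ha)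
  have e2 : (S.drop m).countP (fun x => decide (v < x)) = (S.drop m).length :=
    List.countP_eq_length.2 (by intro a ha; simpa using h2 a ha)
  rw [e1, e2, List.length_drop]
  omega

lemma pvMono (S : List Int) (hS : S.Pairwise (· ≤ ·)) {p q : Nat} (hpq : p ≤ q)
    (hq : q < S.length) : S[p]'(by omega) ≤ S[q] := by
  rcases Nat.eq_or_lt_of_le hpq with rfl | h
  · exact le_rfl
  · exact List.pairwise_iff_getElem.1 hS p q (by omega) hq h

lemma pvNoble_of_hit (S : List Int) (hS : S.Pairwise (· ≤ ·)) (j : Nat) (hj : j < S.length)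
    (hside : j = S.length - 1 ∨ S.getD j 0 ≠ S.getD (j + 1) 0) :
    S.countP (fun x => decide (S.getD j 0 < x)) = S.length - (j + 1) := by
  have hgd : S.getD j 0 = S[j] := List.getD_eq_getElem S 0 hj
  apply pvCount_of_split S _ (j+1) (by omega)
  · intro x hx
    rcases List.mem_iff_getElem.1 hx with ⟨k, hk, rfl⟩
    have hk' : k ≤ j := by simp [List.length_take] at hk; omega
    rw [List.getElem_take, hgd]
    exact not_lt.2 (pvMono S hS hk' hj)
  · intro x hx
    rcases List.mem_iff_getElem.1 hx with ⟨k, hk, rfl⟩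
    rw [List.getElem_drop]
    have hlen : j + 1 + k < S.length := by simp at hk; omega
    have hj1 : j + 1 < S.length := by omega
    have hjj1 : S[j] < S[j+1] := by
      rcases hside with h | h
      · omega
      · have := pvMono S hS (show j ≤ j+1 by omega) hj1
        rw [hgd, List.getD_eq_getElem S 0 hj1] at h
        omega
    have := pvMono S hS (show j+1 ≤ j+1+k by omega) hlen
    rw [hgd]; omega

lemma pvSorted_split (S : List Int) (hS : S.Pairwise (· ≤ ·)) (v : Int) :
    (∀ x ∈ S.take (S.length - S.countP (fun x => decide (v < x))), x ≤ v) ∧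
    (∀ x ∈ S.drop (S.length - S.countP (fun x => decide (v < x))), v < x) := by
  induction S with
  | nil => simp
  | cons a T ih =>
    rw [List.pairwise_cons] at hS
    obtain ⟨ha, hT⟩ := hS
    by_cases hva : v < a
    · have hall : ∀ x ∈ a :: T, v < x := by
        intro x hx
        rcases List.mem_cons.1 hx with rfl | hx
        · exact hva
        · exact lt_of_lt_of_le hva (ha x hx)
      have : (a :: T).countP (fun x => decide (v < x)) = (a :: T).length :=
        List.countP_eq_length.2 (by intro x hx; simpa using hall x hx)
      rw [this]
      simp only [Nat.sub_self, List.take_zero, List.drop_zero]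
      exact ⟨by simp, hall⟩
    · have hc : (a :: T).countP (fun x => decide (v < x)) = T.countP (fun x => decide (v < x)) := by
        rw [List.countP_cons]; simp [hva]
      have hle : T.countP (fun x => decide (v < x)) ≤ T.length := List.countP_le_length
      have hlen : (a :: T).length - (a :: T).countP (fun x => decide (v < x))
          = (T.length - T.countP (fun x => decide (v < x))) + 1 := by
        rw [hc]; simp [List.length_cons]; omega
      rw [hlen]
      obtain ⟨ih1, ih2⟩ := ih hT
      constructor
      · intro x hx
        rcases List.mem_cons.1 hx with rfl | hx'
        · exact not_lt.1 hva
        · exact ih1 x hx'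
      · intro x hx
        exact ih2 x hx

lemma pvCount_lt_length (S : List Int) (v : Int) (hv : v ∈ S) :
    S.countP (fun x => decide (v < x)) < S.length := by
  rcases Nat.lt_or_ge (S.countP (fun x => decide (v < x))) S.length with h | h
  · exact h
  · have heq : S.countP (fun x => decide (v < x)) = S.length :=
      le_antisymm List.countP_le_length h
    have := List.countP_eq_length.1 heq v hv
    simp at this

lemma pvMem_take (S : List Int) (m k : Nat) (h : k < m) (h2 : k < S.length) :
    S[k] ∈ S.take m :=
  List.mem_take_iff_getElem.2 ⟨k, by omega, rfl⟩

lemma pvMem_drop (S : List Int) (m k : Nat) (hm : m ≤ k) (h2 : k < S.length) :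
    S[k] ∈ S.drop m := by
  have hk : k - m < (S.drop m).length := by rw [List.length_drop]; omega
  have h3 : (S.drop m)[k - m] = S[m + (k - m)] := List.getElem_drop
  have h4 : S[m + (k - m)] = S[k] := by congr 1; omega
  rw [h4] at h3
  rw [← h3]; exact List.getElem_mem hk

-- in a sorted list, the element at index n - g - 1 (g = #greater-than-v, v present) is v
lemma pvGetD_of_noble (S : List Int) (hS : S.Pairwise (· ≤ ·)) (v : Int) (hv : v ∈ S)
    (hglt : S.countP (fun x => decide (v < x)) < S.length) :
    S.getD (S.length - S.countP (fun x => decide (v < x)) - 1) 0 = v := by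
  set g := S.countP (fun x => decide (v < x)) with hg
  set n := S.length with hn
  have hj : n - g - 1 < n := by omega
  have hsplit := pvSorted_split S hS v
  rw [List.getD_eq_getElem S 0 hj]
  have h1 : S[n - g - 1] ≤ v := hsplit.1 _ (pvMem_take S (n - g) _ (by omega) hj)
  rcases List.mem_iff_getElem.1 hv with ⟨k, hk, hkv⟩
  have hklt : k < n - g := by
    by_contra hge
    have h2 := hsplit.2 S[k] (pvMem_drop S (n - g) k (by omega) hk)
    rw [hkv] at h2
    exact absurd h2 (lt_irrefl v)
  have h2 : v ≤ S[n - g - 1] := by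
    rw [← hkv]
    exact pvMono S hS (by omega) hj
  omega

lemma pvHit_of_noble (S : List Int) (hS : S.Pairwise (· ≤ ·)) (v : Int) (hv : v ∈ S)
    (hc : (S.countP (fun x => decide (v < x)) : Int) = v) :
    ∃ j, j < S.length ∧ pvHitA S S.length j := by
  set g := S.countP (fun x => decide (v < x)) with hg
  have hglt : g < S.length := pvCount_lt_length S v hv
  set n := S.length with hn
  have hsplit := pvSorted_split S hS v
  have hSj : S.getD (n - g - 1) 0 = v := pvGetD_of_noble S hS v hv hglt
  refine ⟨n - g - 1, by omega, ?_, ?_⟩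
  · rintro ⟨hne, heq⟩
    have hj1 : n - g - 1 + 1 < n := by omega
    have h2 := hsplit.2 S[n - g - 1 + 1] (pvMem_drop S (n - g) _ (by omega) hj1)
    rw [← List.getD_eq_getElem S 0 hj1, ← heq, hSj] at h2
    exact absurd h2 (lt_irrefl v)
  · rw [hSj, ← hc]
    omega

lemma pvLoopB_one_or_neg (cnt : List Int) : ∀ k g, pvLoopB cnt k g = 1 ∨ pvLoopB cnt k g = -1 := by
  intro k
  induction k with
  | zero => intro g; right; rfl
  | succ v ih =>
    intro g
    rw [pvLoopB]
    split_ifs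
    · left; rfl
    · exact ih _

-- splitting a ≥-count at a value
lemma pvCount_ge_split (A : List Int) (v : Int) :
    A.countP (fun x => decide (v ≤ x))
      = A.countP (fun x => decide (v + 1 ≤ x)) + A.countP (fun x => decide (x = v)) := by
  induction A with
  | nil => simp
  | cons a T ih =>
    simp only [List.countP_cons, ih]
    by_cases h1 : v ≤ a <;> by_cases h2 : v + 1 ≤ a <;> by_cases h3 : a = v <;>
      simp [h1, h2, h3] <;> omega

lemma pvCount_gt_eq_ge (A : List Int) (v : Int) :
    A.countP (fun x => decide (v < x)) = A.countP (fun x => decide (v + 1 ≤ x)) := by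
  apply List.countP_congr
  intro x _
  by_cases h : v < x
  · simp only [h, decide_true]
    have : v + 1 ≤ x := by omega
    simp [this]
  · simp only [h, decide_false]
    have : ¬ (v + 1 ≤ x) := by omega
    simp [this]

lemma pvFill_spec (m : Nat) : ∀ (A : List Int) (cnt : List Int) (big : Int), cnt.length = m →
    (A.foldl (pvFillB m) (cnt, big)).1.length = m ∧
    (∀ j, j < m → (A.foldl (pvFillB m) (cnt, big)).1.getD j 0
        = cnt.getD j 0 + (A.countP (fun x => decide (x = (j : Int))) : Int)) ∧
    (A.foldl (pvFillB m) (cnt, big)).2 = big + (A.countP (fun x => decide ((m : Int) ≤ x)) : Int) := by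
  intro A
  induction A with
  | nil => intro cnt big hlen; simp [hlen]
  | cons x T ih =>
    intro cnt big hlen
    rw [List.foldl_cons]
    by_cases h1 : 0 ≤ x ∧ x < (m : Int)
    · have hx : x.toNat < m := by omega
      have hstep : pvFillB m (cnt, big) x = (cnt.set x.toNat (cnt.getD x.toNat 0 + 1), big) := by
        rw [pvFillB]; simp [h1]
      rw [hstep]
      obtain ⟨ihl, ihc, ihb⟩ := ih (cnt.set x.toNat (cnt.getD x.toNat 0 + 1)) big (by simp [hlen])
      refine ⟨ihl, ?_, ?_⟩
      · intro j hj
        rw [ihc j hj]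
        have hset : (cnt.set x.toNat (cnt.getD x.toNat 0 + 1)).getD j 0
            = if x.toNat = j then cnt.getD j 0 + 1 else cnt.getD j 0 := by
          rw [List.getD_eq_getElem?_getD, List.getElem?_set]
          by_cases he : x.toNat = j
          · subst he
            simp [hx, hlen, List.getD_eq_getElem?_getD]
          · simp [he, List.getD_eq_getElem?_getD]
        rw [hset, List.countP_cons]
        by_cases he : x.toNat = j
        · have hxy : x = (j : Int) := by omega
          subst hxy
          simp [he]
          ring
        · have hxy : ¬ x = (j : Int) := by omega
          simp [he, hxy]
      · rw [ihb, List.countP_cons]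
        have : ¬ (m : Int) ≤ x := by omega
        simp [this]
    · by_cases h2 : (m : Int) ≤ x
      · have hstep : pvFillB m (cnt, big) x = (cnt, big + 1) := by
          rw [pvFillB]; simp [h1, h2]
        rw [hstep]
        obtain ⟨ihl, ihc, ihb⟩ := ih cnt (big + 1) hlen
        refine ⟨ihl, ?_, ?_⟩
        · intro j hj
          rw [ihc j hj, List.countP_cons]
          have hxy : ¬ x = (j : Int) := by omega
          simp [hxy]
        · rw [ihb, List.countP_cons]
          simp only [h2, decide_true, if_pos]
          push_cast
          ring
      · have hstep : pvFillB m (cnt, big) x = (cnt, big) := by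
          rw [pvFillB]; simp [h1, h2]
        rw [hstep]
        obtain ⟨ihl, ihc, ihb⟩ := ih cnt big hlen
        refine ⟨ihl, ?_, ?_⟩
        · intro j hj
          rw [ihc j hj, List.countP_cons]
          have hxy : ¬ x = (j : Int) := by omega
          simp [hxy]
        · rw [ihb, List.countP_cons]
          have : ¬ (m : Int) ≤ x := by omega
          simp [this]

lemma pvLoopB_eq_one_iff (A : List Int) : ∀ (k : Nat) (cnt : List Int),
    (∀ j, j < k → cnt.getD j 0 = (A.countP (fun x => decide (x = (j : Int))) : Int)) →
    (pvLoopB cnt k ((A.countP (fun x => decide ((k : Int) ≤ x)) : Int)) = 1 ↔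
      ∃ j : Nat, j < k ∧ pvNoble A (j : Int)) := by
  intro k
  induction k with
  | zero =>
    intro cnt _
    constructor
    · intro h; cases h
    · rintro ⟨j, hj, -⟩; omega
  | succ v ih =>
    intro cnt hcnt
    rw [pvLoopB]
    have hcv : cnt.getD v 0 = (A.countP (fun x => decide (x = (v : Int))) : Int) :=
      hcnt v (by omega)
    have hmem : cnt.getD v 0 ≠ 0 ↔ (v : Int) ∈ A := by
      rw [hcv]
      constructor
      · intro h
        have hpos : 0 < A.countP (fun x => decide (x = (v : Int))) := by omega
        rcases List.countP_pos_iff.1 hpos with ⟨a, ha, hav⟩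
        simp at hav
        rwa [← hav]
      · intro h
        have hpos : 0 < A.countP (fun x => decide (x = (v : Int))) :=
          List.countP_pos_iff.2 ⟨(v : Int), h, by simp⟩
        omega
    have hgt : (A.countP (fun x => decide (((v : Nat) : Int) < x)) : Int)
        = (A.countP (fun x => decide (((v + 1 : Nat) : Int) ≤ x)) : Int) := by
      rw [pvCount_gt_eq_ge]
      have he : ((v : Nat) : Int) + 1 = ((v + 1 : Nat) : Int) := by push_cast; ring
      rw [he]
    by_cases hb : cnt.getD v 0 ≠ 0 ∧ (A.countP (fun x => decide (((v + 1 : Nat) : Int) ≤ x)) : Int) = (v : Int)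
    · rw [if_pos hb]
      constructor
      · intro _
        exact ⟨v, by omega, hmem.1 hb.1, by rw [hgt]; exact hb.2⟩
      · intro _; rfl
    · rw [if_neg hb]
      have hc : A.countP (fun x => decide (((v + 1 : Nat) : Int) ≤ x))
          = A.countP (fun x => decide ((v : Int) + 1 ≤ x)) := by
        have he : ((v : Nat) : Int) + 1 = ((v + 1 : Nat) : Int) := by push_cast; ring
        rw [he]
      have hnext : (A.countP (fun x => decide (((v + 1 : Nat) : Int) ≤ x)) : Int) + cnt.getD v 0
          = (A.countP (fun x => decide (((v : Nat) : Int) ≤ x)) : Int) := by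
        rw [hcv]
        have hsplit := pvCount_ge_split A (v : Int)
        rw [hc]
        omega
      rw [hnext, ih cnt (fun j hj => hcnt j (by omega))]
      constructor
      · rintro ⟨j, hj, hn⟩; exact ⟨j, by omega, hn⟩
      · rintro ⟨j, hj, hn⟩
        rcases Nat.lt_succ_iff_lt_or_eq.1 hj with h | h
        · exact ⟨j, h, hn⟩
        · exfalso
          subst h
          apply hb
          refine ⟨hmem.2 hn.1, ?_⟩
          rw [← hgt]
          exact hn.2

lemma pvNoble_sorted_iff (A : List Int) (v : Int) :
    pvNoble (PySem.List.sorted A (fun x => x) false) v ↔ pvNoble A v := by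
  unfold pvNoble
  rw [PySem.List.mem_sorted,
    (PySem.List.sorted_perm A (fun x => x) false).countP_congr (fun x _ => rfl)]

lemma pvSorted_pairwise_le (A : List Int) :
    (PySem.List.sorted A (fun x => x) false).Pairwise (· ≤ ·) := by
  have h := PySem.List.sorted_pairwise A (fun x => x)
  simpa using h

lemma pvPortA_eq_one_iff (A : List Int) :
    ifNobleIntegerExistsInArray A = 1 ↔ ∃ v, pvNoble A v := by
  unfold ifNobleIntegerExistsInArray
  set S := PySem.List.sorted A (fun x => x) false with hs
  have hS : S.Pairwise (· ≤ ·) := pvSorted_pairwise_le A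
  rw [pvLoopA_eq_one_iff S S.length 0]
  constructor
  · rintro ⟨j, -, hj, hside, heq⟩
    refine ⟨S.getD j 0, (pvNoble_sorted_iff A _).1 ⟨?_, ?_⟩⟩
    · rw [List.getD_eq_getElem S 0 hj]
      exact List.getElem_mem hj
    · have hside' : j = S.length - 1 ∨ S.getD j 0 ≠ S.getD (j + 1) 0 := by
        by_cases h : j = S.length - 1
        · exact Or.inl h
        · right
          intro hcon
          exact hside ⟨h, hcon⟩
      rw [pvNoble_of_hit S hS j hj hside']
      omega
  · rintro ⟨v, hv⟩
    have hv' := (pvNoble_sorted_iff A v).2.mt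
    have hv2 : pvNoble S v := by
      rw [pvNoble_sorted_iff A v]
      exact hv
    rcases pvHit_of_noble S hS v hv2.1 hv2.2 with ⟨j, hj, hh⟩
    exact ⟨j, Nat.zero_le j, hj, hh⟩

lemma pvGetD_replicate (n j : Nat) : (List.replicate n (0 : Int)).getD j 0 = 0 := by
  rw [List.getD_eq_getElem?_getD, List.getElem?_replicate]
  by_cases h : j < n <;> simp [h]

lemma pvPortB_eq_one_iff (A : List Int) :
    ifNobleIntegerExistsInArray_alt A = 1 ↔ ∃ j : Nat, j < A.length ∧ pvNoble A (j : Int) := by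
  show pvLoopB (List.foldl (pvFillB A.length) (List.replicate A.length 0, 0) A).1 A.length
      (List.foldl (pvFillB A.length) (List.replicate A.length 0, 0) A).2 = 1 ↔ _
  obtain ⟨hl, hc, hb⟩ := pvFill_spec A.length A (List.replicate A.length 0) 0 (by simp)
  rw [hb]
  have hz : (0 : Int) + (A.countP (fun x => decide ((A.length : Int) ≤ x)) : Int)
      = (A.countP (fun x => decide ((A.length : Int) ≤ x)) : Int) := by ring
  rw [hz]
  exact pvLoopB_eq_one_iff A A.length _
    (fun j hj => by rw [hc j hj, pvGetD_replicate]; ring)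

lemma pvNoble_exists_iff (A : List Int) :
    (∃ v, pvNoble A v) ↔ ∃ j : Nat, j < A.length ∧ pvNoble A (j : Int) := by
  constructor
  · rintro ⟨v, hv⟩
    have h0 : 0 ≤ v := by
      have := hv.2
      omega
    have hlt : v < (A.length : Int) := by
      have h1 := pvCount_lt_length A v hv.1
      have h2 := hv.2
      omega
    refine ⟨v.toNat, by omega, ?_⟩
    rwa [Int.toNat_of_nonneg h0]
  · rintro ⟨j, _, hn⟩
    exact ⟨j, hn⟩

lemma pvPortA_one_or_neg (A : List Int) :
    ifNobleIntegerExistsInArray A = 1 ∨ ifNobleIntegerExistsInArray A = -1 := by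
  unfold ifNobleIntegerExistsInArray
  exact pvLoopA_one_or_neg _ _ 0

lemma pvPortB_one_or_neg (A : List Int) :
    ifNobleIntegerExistsInArray_alt A = 1 ∨ ifNobleIntegerExistsInArray_alt A = -1 := by
  unfold ifNobleIntegerExistsInArray_alt
  exact pvLoopB_one_or_neg _ _ _

-- ===== VERDICT (by name: the statement is the Claim_ definition above) =====
theorem ifNobleIntegerExistsInArray_spec : Claim_equal_ifNobleIntegerExistsInArray := by
  unfold Claim_equal_ifNobleIntegerExistsInArray Spec_ifNobleIntegerExistsInArray
  intro A _
  have hA := pvPortA_eq_one_iff A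
  have hB := (pvPortB_eq_one_iff A).trans (pvNoble_exists_iff A).symm
  rcases pvPortA_one_or_neg A with ha | ha <;> rcases pvPortB_one_or_neg A with hb | hb
  · rw [ha, hb]
  · have h1 := hB.2 (hA.1 ha)
    rw [hb] at h1
    norm_num at h1
  · have h1 := hA.2 (hB.1 hb)
    rw [ha] at h1
    norm_num at h1
  · rw [ha, hb]
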